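-- pv_equiv track=rewrite | github.com/taking-lying-flat/algo-primer | essential/stack.py | riddle
-- ===== SOURCE A (Python) =====
-- from typing import List
--
-- def riddle(
--     arr: List[int]
-- ) -> List[int]:
--     """
--     找到每个窗口大小(1到n)中，所有窗口最小值的最大值
--         1. 单调栈求边界：一次遍历同时找到每个元素的左右边界
--            - left[i] ：左侧第一个 < arr[i] 的位置，默认 -1
--            - right[i]：右侧第一个 < arr[i] 的位置，默认  n
--            - 维护单调不降的索引栈；当前值更小则弹栈并写右边界；栈顶即为左边界
--         2. 计算窗口长度：len = right[i] - left[i] - 1；更新 ans[len-1]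
--         3. 后向填充：ans[k] = max(ans[k], ans[k+1])
--     """
--     n = len(arr)
--     left = [-1] * n
--     right = [n] * n
--     stack: List[int] = []
--
--     for i in range(n):
--         while stack and arr[i] < arr[stack[-1]]:
--             prev = stack.pop()
--             right[prev] = i
--         if stack:
--             left[i] = stack[-1]
--         stack.append(i)
--
--     ans = [0] * n
--     for i in range(n):
--         length = right[i] - left[i] - 1
--         ans[length - 1] = max(ans[length - 1], arr[i])
--
--     for k in range(n - 2, -1, -1):
--         ans[k] = max(ans[k], ans[k + 1])
--
--     return ans
-- ===== SOURCE B (Python) =====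
-- from typing import List
--
-- def riddle(
--     arr: List[int]
-- ) -> List[int]:
--     # For each i, find the window boundaries by direct outward scans (no stack):
--     # l = nearest index on the left with arr[l] <= arr[i] (default -1),
--     # r = nearest index on the right with arr[r] < arr[i] (default n),
--     # then bucket arr[i] at window length r-l-1 and back-fill with suffix maxima.
--     n = len(arr)
--     ans = [0] * n
--     for i in range(n):
--         x = arr[i]
--         l = i - 1
--         while l >= 0 and arr[l] > x:
--             l -= 1
--         r = i + 1
--         while r < n and arr[r] >= x:
--             r += 1
--         length = r - l - 1
--         ans[length - 1] = max(ans[length - 1], x)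
--     for k in range(n - 2, -1, -1):
--         ans[k] = max(ans[k], ans[k + 1])
--     return ans
-- ===== Notes on version B (the rewrite author's own statement) =====
-- stated objective: simpler
-- what changed: Replaces the fused monotonic-stack pass and the left/right boundary arrays with direct outward scans per element: for each i, B walks left to the nearest value <= arr[i] and right to the nearest value < arr[i], bucketing immediately, so no stack and no auxiliary index arrays exist.
import Mathlib
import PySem

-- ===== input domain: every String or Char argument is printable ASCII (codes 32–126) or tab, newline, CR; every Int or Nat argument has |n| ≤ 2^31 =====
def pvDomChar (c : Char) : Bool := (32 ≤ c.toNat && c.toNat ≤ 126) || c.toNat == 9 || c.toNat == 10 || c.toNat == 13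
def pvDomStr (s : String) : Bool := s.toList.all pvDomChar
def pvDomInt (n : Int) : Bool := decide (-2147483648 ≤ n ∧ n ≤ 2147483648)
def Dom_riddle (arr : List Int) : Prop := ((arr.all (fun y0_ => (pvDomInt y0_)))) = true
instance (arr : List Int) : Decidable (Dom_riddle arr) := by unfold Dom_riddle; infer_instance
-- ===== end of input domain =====

-- B replaces A's fused monotonic-stack pass (and its left/right arrays) by direct outward
-- scans per element; objective: simpler (no stack, no auxiliary arrays), not faster.

-- arr[j] for an in-range index j (every index below is in range on every input)
def pvGetN (arr : List Int) (j : Nat) : Int := arr.getD j 0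

-- ===== PORT A =====
-- the inner `while stack and arr[i] < arr[stack[-1]]` loop (stack head = Python stack[-1])
def pvPop (arr : List Int) (i : Nat) : List Nat → List Int → List Nat × List Int
  | [], right => ([], right)
  | t :: rest, right =>
    if pvGetN arr i < pvGetN arr t then pvPop arr i rest (right.set t (i : Int))
    else (t :: rest, right)

-- one iteration of A's first `for i in range(n)` loop; state = (left, right, stack)
def pvStep1 (arr : List Int) (s : List Int × List Int × List Nat) (i : Nat) :
    List Int × List Int × List Nat :=
  let sr := pvPop arr i s.2.2 s.2.1
  let left' := match sr.1 with
    | [] => s.1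
    | t :: _ => s.1.set i (t : Int)
  (left', sr.2, i :: sr.1)

def pvLoop1 (arr : List Int) (m : Nat) : List Int × List Int × List Nat :=
  (List.range m).foldl (pvStep1 arr)
    (List.replicate arr.length (-1), List.replicate arr.length (arr.length : Int), [])

-- A's second loop (length-1 is provably ≥ 0, so .toNat is exact)
def pvFill (arr left right : List Int) (n : Nat) : List Int :=
  (List.range n).foldl (fun ans i =>
    let len : Int := pvGetN right i - pvGetN left i - 1
    ans.set (len - 1).toNat (max (pvGetN ans (len - 1).toNat) (pvGetN arr i)))
    (List.replicate n 0)

-- the final `for k in range(n-2, -1, -1)` loop (identical in both Pythons)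
def pvBack (n : Nat) (ans : List Int) : List Int :=
  (PySem.List.pyRange ((n : Int) - 2) (-1) (-1)).foldl (fun a k =>
    a.set k.toNat (max (pvGetN a k.toNat) (pvGetN a (k.toNat + 1)))) ans

def riddle (arr : List Int) : List Int :=
  let n := arr.length
  let s := pvLoop1 arr n
  pvBack n (pvFill arr s.1 s.2.1 n)

-- ===== PORT B =====
-- B's `while l >= 0 and arr[l] > x: l -= 1` scan; pvScanL arr x i = final l
def pvScanL (arr : List Int) (x : Int) : Nat → Int
  | 0 => -1
  | j + 1 => if x < pvGetN arr j then pvScanL arr x j else (j : Int)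

-- B's `while r < n and arr[r] >= x: r += 1` scan; fuel = n - j keeps r ≤ n
def pvScanR (arr : List Int) (x : Int) : Nat → Nat → Nat
  | j, 0 => j
  | j, fuel + 1 => if x ≤ pvGetN arr j then pvScanR arr x (j + 1) fuel else j

def riddle_alt (arr : List Int) : List Int :=
  let n := arr.length
  let ans := (List.range n).foldl (fun ans i =>
    let x := pvGetN arr i
    let l : Int := pvScanL arr x i
    let r : Int := (pvScanR arr x (i + 1) (n - (i + 1)) : Nat)
    let len := r - l - 1
    ans.set (len - 1).toNat (max (pvGetN ans (len - 1).toNat) x)) (List.replicate n 0)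
  pvBack n ans

-- ===== PRECONDITION & SPEC =====
def Spec_riddle (arr : List Int) (out : List Int) : Prop := out = riddle_alt arr
instance (arr : List Int) (out : List Int) : Decidable (Spec_riddle arr out) := by unfold Spec_riddle; infer_instance

-- ===== CLAIM (what is proved, stated in full; the proofs are below) =====
def Claim_equal_riddle : Prop := ∀ (arr : List Int), Dom_riddle arr → Spec_riddle arr (riddle arr)

-- ===== LEMMAS AND PROOFS =====

-- "l is the nearest index left of j whose value is ≤ x (−1 if none)"
def IsLeft (arr : List Int) (x : Int) (j : Nat) (l : Int) : Prop :=
  l < (j : Int) ∧ (∀ k : Nat, l < (k : Int) → k < j → x < pvGetN arr k) ∧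
    (l = -1 ∨ (0 ≤ l ∧ pvGetN arr l.toNat ≤ x))

-- "r is the nearest index in [j, n) whose value is < x (n if none)"
def IsRight (arr : List Int) (x : Int) (j n r : Nat) : Prop :=
  (r = n ∧ ∀ k, j ≤ k → k < n → x ≤ pvGetN arr k) ∨
  (j ≤ r ∧ r < n ∧ pvGetN arr r < x ∧ ∀ k, j ≤ k → k < r → x ≤ pvGetN arr k)

theorem isLeft_unique (arr : List Int) (x : Int) (j : Nat) (l₁ l₂ : Int)
    (h₁ : IsLeft arr x j l₁) (h₂ : IsLeft arr x j l₂) : l₁ = l₂ := by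
  obtain ⟨h1j, h1k, h1v⟩ := h₁
  obtain ⟨h2j, h2k, h2v⟩ := h₂
  by_contra hne
  rcases lt_or_gt_of_ne hne with hlt | hlt
  · rcases h2v with h | ⟨h0, hv⟩
    · omega
    · exact absurd (h1k l₂.toNat (by omega) (by omega)) (by simpa using not_lt.2 hv)
  · rcases h1v with h | ⟨h0, hv⟩
    · omega
    · exact absurd (h2k l₁.toNat (by omega) (by omega)) (by simpa using not_lt.2 hv)

theorem isRight_unique (arr : List Int) (x : Int) (j n r₁ r₂ : Nat)
    (h₁ : IsRight arr x j n r₁) (h₂ : IsRight arr x j n r₂) : r₁ = r₂ := by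
  by_contra hne
  rcases Nat.lt_or_ge r₁ r₂ with hlt | hge
  · rcases h₁ with ⟨h, _⟩ | ⟨hj, hn, hv, _⟩
    · rcases h₂ with ⟨h', _⟩ | ⟨_, hn', _, _⟩ <;> omega
    · rcases h₂ with ⟨_, hall⟩ | ⟨_, _, _, hall⟩ <;>
        exact absurd (hall r₁ hj (by omega)) (not_le.2 hv)
  · have hlt : r₂ < r₁ := by omega
    rcases h₂ with ⟨h, _⟩ | ⟨hj, hn, hv, _⟩
    · rcases h₁ with ⟨h', _⟩ | ⟨_, hn', _, _⟩ <;> omega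
    · rcases h₁ with ⟨_, hall⟩ | ⟨_, _, _, hall⟩ <;>
        exact absurd (hall r₂ hj (by omega)) (not_le.2 hv)

theorem scanL_isLeft (arr : List Int) (x : Int) (j : Nat) :
    IsLeft arr x j (pvScanL arr x j) := by
  induction j with
  | zero =>
    refine ⟨by simp [pvScanL], fun k hk hk0 => absurd hk0 (by omega), Or.inl (by simp [pvScanL])⟩
  | succ j ih =>
    rw [pvScanL]
    split
    · obtain ⟨hj, hk, hv⟩ := ih
      refine ⟨by omega, fun k hk1 hk2 => ?_, hv⟩
      rcases Nat.lt_or_ge k j with h | h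
      · exact hk k hk1 h
      · have : k = j := by omega
        subst this; assumption
    · refine ⟨by omega, fun k hk1 hk2 => absurd hk2 (by omega), Or.inr ⟨by omega, by
        simpa using not_lt.1 (by assumption)⟩⟩

theorem scanR_isRight (arr : List Int) (x : Int) (fuel : Nat) : ∀ j, j + fuel = arr.length →
    IsRight arr x j arr.length (pvScanR arr x j fuel) := by
  induction fuel with
  | zero =>
    intro j hj
    exact Or.inl ⟨by simpa [pvScanR] using hj.symm ▸ rfl, fun k hk1 hk2 => by omega⟩
  | succ fuel ih =>
    intro j hj
    rw [pvScanR]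
    split
    · have h := ih (j + 1) (by omega)
      rcases h with ⟨hr, hall⟩ | ⟨hj1, hn, hv, hall⟩
      · exact Or.inl ⟨hr, fun k hk1 hk2 => by
          rcases Nat.eq_or_lt_of_le hk1 with h | h
          · subst h; assumption
          · exact hall k (by omega) hk2⟩
      · exact Or.inr ⟨by omega, hn, hv, fun k hk1 hk2 => by
          rcases Nat.eq_or_lt_of_le hk1 with h | h
          · subst h; assumption
          · exact hall k (by omega) hk2⟩
    · exact Or.inr ⟨le_refl j, by omega, by simpa using not_le.1 (by assumption), fun k hk1 hk2 => by omega⟩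

-- indexing / length toolbox
theorem pvGetN_set (l : List Int) (u : Nat) (v : Int) (t : Nat) :
    pvGetN (l.set u v) t = if u = t ∧ t < l.length then v else pvGetN l t := by
  simp only [pvGetN, List.getD_eq_getElem?_getD, List.getElem?_set]
  by_cases h1 : u = t
  · subst h1
    by_cases h2 : u < l.length <;> simp [h2]
  · simp [h1]

theorem pvGetN_replicate (n : Nat) (v : Int) (t : Nat) (h : t < n) :
    pvGetN (List.replicate n v) t = v := by
  simp [pvGetN, List.getElem?_replicate, h]

theorem foldlSet_length (v : Int) (P : List Nat) (right : List Int) :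
    (P.foldl (fun r u => r.set u v) right).length = right.length := by
  induction P generalizing right with
  | nil => rfl
  | cons u P ih => simp [List.foldl_cons, ih]

theorem foldlSet_getN (v : Int) (P : List Nat) (right : List Int) (t : Nat) :
    pvGetN (P.foldl (fun r u => r.set u v) right) t =
      if t ∈ P ∧ t < right.length then v else pvGetN right t := by
  induction P generalizing right with
  | nil => simp
  | cons u P ih =>
    simp only [List.foldl_cons, ih, List.length_set, pvGetN_set, List.mem_cons]
    by_cases ht : t < right.length
    · by_cases hm : t ∈ P
      · simp [hm, ht]
      · by_cases hu : u = t <;> simp [hm, ht, hu]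
        · intro h; omega
    · simp [ht]

-- pvPop computes dropWhile on the stack and writes i into right at each popped index
theorem pvPop_fst (arr : List Int) (i : Nat) (st : List Nat) (right : List Int) :
    (pvPop arr i st right).1 = st.dropWhile (fun t => decide (pvGetN arr i < pvGetN arr t)) := by
  induction st generalizing right with
  | nil => simp [pvPop]
  | cons t rest ih =>
    rw [pvPop, List.dropWhile_cons]
    by_cases h : pvGetN arr i < pvGetN arr t <;> simp [h, ih]

theorem pvPop_snd (arr : List Int) (i : Nat) (st : List Nat) (right : List Int) :
    (pvPop arr i st right).2 =
      (st.takeWhile (fun t => decide (pvGetN arr i < pvGetN arr t))).foldl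
        (fun r t => r.set t (i : Int)) right := by
  induction st generalizing right with
  | nil => simp [pvPop]
  | cons t rest ih =>
    rw [pvPop, List.takeWhile_cons]
    by_cases h : pvGetN arr i < pvGetN arr t <;> simp [h, ih]

-- if some index k < m has value ≤ arr[m], some stack element ≥ k does too
theorem exists_stack_candidate (arr : List Int) (m : Nat) (st : List Nat)
    (hmem : ∀ j : Nat, j ∈ st ↔ (j < m ∧ ∀ k, j < k → k < m → pvGetN arr j ≤ pvGetN arr k)) :
    ∀ d k, m - k ≤ d → k < m → pvGetN arr k ≤ pvGetN arr m →
      ∃ k', k ≤ k' ∧ k' ∈ st ∧ pvGetN arr k' ≤ pvGetN arr m := by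
  intro d
  induction d with
  | zero => intro k hd hk _; omega
  | succ d ih =>
    intro k hd hk hv
    by_cases hin : k ∈ st
    · exact ⟨k, le_refl k, hin, hv⟩
    · have := (hmem k).not.1 hin
      push_neg at this
      obtain ⟨k2, hk2a, hk2b, hk2c⟩ := this hk
      obtain ⟨k', h1, h2, h3⟩ := ih k2 (by omega) hk2b (le_trans (le_of_lt hk2c) hv)
      exact ⟨k', by omega, h2, h3⟩

-- the invariant of A's first loop after processing i = 0 .. m-1
def InvA (arr : List Int) (m : Nat) (s : List Int × List Int × List Nat) : Prop :=
  s.1.length = arr.length ∧ s.2.1.length = arr.length ∧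
  s.2.2.Pairwise (· > ·) ∧
  (∀ j : Nat, j ∈ s.2.2 ↔ (j < m ∧ ∀ k, j < k → k < m → pvGetN arr j ≤ pvGetN arr k)) ∧
  (∀ j : Nat, j < m → IsLeft arr (pvGetN arr j) j (pvGetN s.1 j)) ∧
  (∀ j : Nat, j < m →
    (∃ r : Nat, j < r ∧ r < m ∧ pvGetN s.2.1 j = (r : Int) ∧ pvGetN arr r < pvGetN arr j ∧
       ∀ k, j < k → k < r → pvGetN arr j ≤ pvGetN arr k) ∨
    (pvGetN s.2.1 j = (arr.length : Int) ∧ ∀ k, j < k → k < m → pvGetN arr j ≤ pvGetN arr k)) ∧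
  (∀ j : Nat, m ≤ j → j < arr.length → pvGetN s.1 j = -1 ∧ pvGetN s.2.1 j = (arr.length : Int))

theorem invA_step (arr : List Int) (m : Nat) (hm : m < arr.length)
    (s : List Int × List Int × List Nat) (hs : InvA arr m s) :
    InvA arr (m + 1) (pvStep1 arr s m) := by
  obtain ⟨hL, hR, hpw, hmem, hleft, hright, hfresh⟩ := hs
  set p : Nat → Bool := fun t => decide (pvGetN arr m < pvGetN arr t) with hp
  set P := s.2.2.takeWhile p with hPdef
  set S := s.2.2.dropWhile p with hSdef
  have hsplit : P ++ S = s.2.2 := List.takeWhile_append_dropWhile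
  have hPmem : ∀ t ∈ P, pvGetN arr m < pvGetN arr t := by
    intro t ht
    have := List.mem_takeWhile_imp ht
    simpa [hp] using this
  have hSsub : ∀ t ∈ S, t ∈ s.2.2 := by
    intro t ht; rw [← hsplit]; exact List.mem_append_right _ ht
  have hPsub : ∀ t ∈ P, t ∈ s.2.2 := by
    intro t ht; rw [← hsplit]; exact List.mem_append_left _ ht
  have hstlt : ∀ t, t ∈ s.2.2 → t < m := fun t ht => ((hmem t).1 ht).1
  have hPlt : ∀ t ∈ P, t < m := fun t ht => hstlt t (hPsub t ht)
  have hSpair : S.Pairwise (· > ·) := List.Pairwise.sublist (List.dropWhile_sublist p) hpw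
  have hSle : ∀ t ∈ S, pvGetN arr t ≤ pvGetN arr m := by
    intro t ht
    cases hSc : S with
    | nil => rw [hSc] at ht; cases ht
    | cons h tl =>
      have hh : pvGetN arr h ≤ pvGetN arr m := by
        have hhd := List.head?_dropWhile_not p s.2.2
        rw [← hSdef, hSc] at hhd
        simpa [hp] using hhd
      rw [hSc] at ht
      rcases List.mem_cons.1 ht with rfl | htl
      · exact hh
      · have hgt : h > t := by
          rw [hSc] at hSpair
          exact (List.pairwise_cons.1 hSpair).1 t htl
        have htS : t ∈ S := by rw [hSc]; exact List.mem_cons_of_mem _ htl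
        have hhS : h ∈ S := by rw [hSc]; exact List.mem_cons_self
        have hth := ((hmem t).1 (hSsub t htS)).2 h hgt (hstlt h (hSsub h hhS))
        exact le_trans hth hh
  have hcand : ∀ k, k < m → pvGetN arr k ≤ pvGetN arr m →
      ∃ k', k ≤ k' ∧ k' ∈ S ∧ pvGetN arr k' ≤ pvGetN arr m := by
    intro k hk hv
    obtain ⟨k', h1, h2, h3⟩ :=
      exists_stack_candidate arr m s.2.2 hmem (m - k) k (le_refl _) hk hv
    rw [← hsplit] at h2
    rcases List.mem_append.1 h2 with hP' | hS'
    · exact absurd h3 (not_le.2 (hPmem _ hP'))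
    · exact ⟨k', h1, hS', h3⟩
  have hfst : (pvPop arr m s.2.2 s.2.1).1 = S := pvPop_fst arr m s.2.2 s.2.1
  have hsnd : (pvPop arr m s.2.2 s.2.1).2 =
      P.foldl (fun r t => r.set t (m : Int)) s.2.1 := pvPop_snd arr m s.2.2 s.2.1
  have hget : ∀ t : Nat, pvGetN (P.foldl (fun r u => r.set u (m : Int)) s.2.1) t =
      if t ∈ P ∧ t < arr.length then (m : Int) else pvGetN s.2.1 t := by
    intro t; rw [foldlSet_getN, hR]
  have hgetL : ∀ t : Nat, t ≠ m →
      pvGetN (pvStep1 arr s m).1 t = pvGetN s.1 t := by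
    intro t htm
    dsimp only [pvStep1]
    rw [hfst]
    cases S with
    | nil => rfl
    | cons h tl =>
      rw [pvGetN_set]
      simp [Ne.symm htm]
  have hmem' : ∀ j : Nat, j ∈ (pvStep1 arr s m).2.2 ↔
      (j < m + 1 ∧ ∀ k, j < k → k < m + 1 → pvGetN arr j ≤ pvGetN arr k) := by
    intro j
    have h22 : (pvStep1 arr s m).2.2 = m :: S := by dsimp only [pvStep1]; rw [hfst]
    rw [h22]
    constructor
    · intro hj
      rcases List.mem_cons.1 hj with rfl | hjS
      · exact ⟨by omega, fun k hk1 hk2 => absurd hk2 (by omega)⟩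
      · have hj2 := (hmem j).1 (hSsub _ hjS)
        refine ⟨by omega, fun k hk1 hk2 => ?_⟩
        rcases Nat.lt_or_ge k m with h | h
        · exact hj2.2 k hk1 h
        · have hkm : k = m := by omega
          subst hkm; exact hSle _ hjS
    · rintro ⟨hj1, hj2⟩
      rcases Nat.lt_or_ge j m with h | h
      · have hjst : j ∈ s.2.2 := (hmem j).2 ⟨h, fun k hk1 hk2 => hj2 k hk1 (by omega)⟩
        rw [← hsplit] at hjst
        rcases List.mem_append.1 hjst with hjP | hjS
        · exact absurd (hj2 m h (by omega)) (not_le.2 (hPmem _ hjP))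
        · exact List.mem_cons_of_mem _ hjS
      · have hjm : j = m := by omega
        subst hjm; exact List.mem_cons_self
  refine ⟨?_, ?_, ?_, hmem', ?_, ?_, ?_⟩
  · -- left length
    dsimp only [pvStep1]; rw [hfst]
    cases S with
    | nil => exact hL
    | cons h tl => simpa using hL
  · -- right length
    dsimp only [pvStep1]; rw [hsnd, foldlSet_length]; exact hR
  · -- pairwise
    dsimp only [pvStep1]; rw [hfst]
    exact List.pairwise_cons.2 ⟨fun t ht => hstlt t (hSsub t ht), hSpair⟩
  · -- left values
    intro j hj
    rcases Nat.lt_or_ge j m with hjm | hjm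
    · rw [hgetL j (by omega)]
      exact hleft j hjm
    · have hjm' : j = m := by omega
      subst hjm'
      dsimp only [pvStep1]
      rw [hfst]
      cases hSc : S with
      | nil =>
        have hv : pvGetN s.1 j = -1 := (hfresh j (le_refl _) hm).1
        refine ⟨by rw [hv]; omega, fun k hk1 hk2 => ?_, Or.inl hv⟩
        rw [hv] at hk1
        by_contra hc
        obtain ⟨k', _, hk'S, _⟩ := hcand k hk2 (not_lt.1 hc)
        rw [hSc] at hk'S; cases hk'S
      | cons h tl =>
        have hhS : h ∈ S := by rw [hSc]; exact List.mem_cons_self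
        have hhm : h < j := hstlt h (hSsub h hhS)
        have hhv : pvGetN arr h ≤ pvGetN arr j := hSle h hhS
        rw [pvGetN_set]
        have hcond : j = j ∧ j < s.1.length := ⟨rfl, by omega⟩
        rw [if_pos hcond]
        refine ⟨by omega, fun k hk1 hk2 => ?_, Or.inr ⟨by omega, by simpa using hhv⟩⟩
        by_contra hc
        obtain ⟨k', hk'1, hk'S, _⟩ := hcand k hk2 (not_lt.1 hc)
        rw [hSc] at hk'S
        rcases List.mem_cons.1 hk'S with rfl | hk'tl
        · omega
        · have : h > k' := by
            rw [hSc] at hSpair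
            exact (List.pairwise_cons.1 hSpair).1 k' hk'tl
          omega
  · -- right values
    intro j hj
    have h21 : (pvStep1 arr s m).2.1 = P.foldl (fun r u => r.set u (m : Int)) s.2.1 := by
      dsimp only [pvStep1]; rw [hsnd]
    rw [h21, hget]
    rcases Nat.lt_or_ge j m with hjm | hjm
    · by_cases hjP : j ∈ P
      · rw [if_pos ⟨hjP, by omega⟩]
        exact Or.inl ⟨m, hjm, by omega, rfl, hPmem j hjP,
          fun k hk1 hk2 => ((hmem j).1 (hPsub j hjP)).2 k hk1 hk2⟩
      · rw [if_neg (by tauto)]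
        rcases hright j hjm with ⟨r, h1, h2, h3, h4, h5⟩ | ⟨h1, h2⟩
        · exact Or.inl ⟨r, h1, by omega, h3, h4, h5⟩
        · refine Or.inr ⟨h1, fun k hk1 hk2 => ?_⟩
          rcases Nat.lt_or_ge k m with hkm | hkm
          · exact h2 k hk1 hkm
          · have hkm' : k = m := by omega
            subst hkm'
            have hjst : j ∈ s.2.2 := (hmem j).2 ⟨hjm, h2⟩
            rw [← hsplit] at hjst
            rcases List.mem_append.1 hjst with hjP' | hjS'
            · exact absurd hjP' hjP
            · exact hSle j hjS'
    · have hjm' : j = m := by omega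
      subst hjm'
      have hjP : j ∉ P := fun hc => by have := hPlt j hc; omega
      rw [if_neg (by tauto)]
      exact Or.inr ⟨(hfresh j (le_refl _) hm).2, fun k hk1 hk2 => by omega⟩
  · -- untouched tail
    intro j hj1 hj2
    constructor
    · rw [hgetL j (by omega)]
      exact (hfresh j (by omega) hj2).1
    · have h21 : (pvStep1 arr s m).2.1 = P.foldl (fun r u => r.set u (m : Int)) s.2.1 := by
        dsimp only [pvStep1]; rw [hsnd]
      rw [h21, hget]
      have hjP : j ∉ P := fun hc => by have := hPlt j hc; omega
      rw [if_neg (by tauto)]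
      exact (hfresh j (by omega) hj2).2

theorem invA_loop (arr : List Int) : ∀ m, m ≤ arr.length →
    InvA arr m (pvLoop1 arr m) := by
  intro m
  induction m with
  | zero =>
    intro _
    refine ⟨by simp [pvLoop1], by simp [pvLoop1], by simp [pvLoop1],
      by simp [pvLoop1], by omega, by omega, fun j _ hj => ?_⟩
    simp only [pvLoop1, List.range_zero, List.foldl_nil]
    exact ⟨pvGetN_replicate _ _ _ hj, pvGetN_replicate _ _ _ hj⟩
  | succ m ih =>
    intro hm
    have h1 : pvLoop1 arr (m + 1) = pvStep1 arr (pvLoop1 arr m) m := by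
      simp [pvLoop1, List.range_succ]
    rw [h1]
    exact invA_step arr m (by omega) _ (ih (by omega))

-- ===== VERDICT (by name: the statement is the Claim_ definition above) =====
theorem riddle_spec : Claim_equal_riddle := by
  intro arr _
  unfold Spec_riddle riddle riddle_alt
  obtain ⟨hL, hR, hpw, hmem, hleft, hright, hfresh⟩ := invA_loop arr arr.length (le_refl _)
  unfold pvFill
  dsimp only
  refine congrArg (pvBack arr.length) (PySem.List.foldl_congr_mem _ _ _ _ ?_)
  intro ans i hi
  have hi' : i < arr.length := List.mem_range.1 hi
  have hxL : pvGetN (pvLoop1 arr arr.length).1 i = pvScanL arr (pvGetN arr i) i :=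
    isLeft_unique _ _ _ _ _ (hleft i hi') (scanL_isLeft _ _ _)
  have hxR : pvGetN (pvLoop1 arr arr.length).2.1 i =
      ((pvScanR arr (pvGetN arr i) (i + 1) (arr.length - (i + 1)) : Nat) : Int) := by
    have hsr := scanR_isRight arr (pvGetN arr i) (arr.length - (i + 1)) (i + 1) (by omega)
    rcases hright i hi' with ⟨r, h1, h2, h3, h4, h5⟩ | ⟨h1, h2⟩
    · have hr : r = pvScanR arr (pvGetN arr i) (i + 1) (arr.length - (i + 1)) :=
        isRight_unique _ _ _ _ _ _
          (Or.inr ⟨by omega, h2, h4, fun k hk1 hk2 => h5 k (by omega) hk2⟩) hsr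
      rw [h3, hr]
    · have hr : arr.length = pvScanR arr (pvGetN arr i) (i + 1) (arr.length - (i + 1)) :=
        isRight_unique _ _ _ _ _ _
          (Or.inl ⟨rfl, fun k hk1 hk2 => h2 k (by omega) hk2⟩) hsr
      rw [h1]; exact_mod_cast hr
  simp only [hxL, hxR]
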